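-- pv_equiv track=rewrite | github.com/ATV-byte/se-python-homework | session3/ex4.py | check
-- ===== SOURCE A (Python) =====
-- def check(s1, s2):
--     s1 = sorted(s1)
--     s2 = sorted(s2)
--
--     for i in range(0, len(s1)):
--         for j in range(0, len(s2)):
--             if s1[i] == s2[j]:
--                 return False
--     return True
-- ===== SOURCE B (Python) =====
-- def check(s1, s2):
--     return set(s1).isdisjoint(s2)
-- ===== Notes on version B (the rewrite author's own statement) =====
-- stated objective: faster
-- what changed: Replaces the sort plus nested all-pairs scan with a hash set of s1 and a single membership pass over s2 (set.isdisjoint).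
import Mathlib
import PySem

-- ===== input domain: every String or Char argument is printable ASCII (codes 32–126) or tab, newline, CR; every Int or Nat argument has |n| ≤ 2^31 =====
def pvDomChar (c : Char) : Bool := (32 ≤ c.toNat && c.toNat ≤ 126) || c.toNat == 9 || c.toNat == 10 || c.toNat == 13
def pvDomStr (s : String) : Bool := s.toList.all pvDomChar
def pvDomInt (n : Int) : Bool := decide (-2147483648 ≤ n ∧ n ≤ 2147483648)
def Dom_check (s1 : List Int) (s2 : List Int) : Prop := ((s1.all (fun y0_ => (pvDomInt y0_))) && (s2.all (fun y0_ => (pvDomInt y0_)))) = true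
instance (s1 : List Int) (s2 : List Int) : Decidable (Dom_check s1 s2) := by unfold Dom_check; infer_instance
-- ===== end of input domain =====

-- B replaces A's sort + nested all-pairs scan with a set of s1 and one membership pass over s2 (faster).
-- ===== PORT A =====
def check (s1 : List Int) (s2 : List Int) : Bool :=
  let t1 := PySem.List.sorted s1 (fun x => x) false
  let t2 := PySem.List.sorted s2 (fun x => x) false
  -- nested for-loops with early 'return False' on a match = all pairs unequal
  t1.all (fun a => t2.all (fun b => !(a == b)))

-- ===== PORT B =====
def check_alt (s1 : List Int) (s2 : List Int) : Bool :=
  PySem.Set.isdisjoint (PySem.Set.ofList s1) s2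

-- ===== PRECONDITION & SPEC =====
def Spec_check (s1 : List Int) (s2 : List Int) (out : Bool) : Prop := out = check_alt s1 s2
instance (s1 : List Int) (s2 : List Int) (out : Bool) : Decidable (Spec_check s1 s2 out) := by unfold Spec_check; infer_instance

-- ===== CLAIM (what is proved, stated in full; the proofs are below) =====
def Claim_equal_check : Prop := ∀ (s1 : List Int) (s2 : List Int), Dom_check s1 s2 → Spec_check s1 s2 (check s1 s2)

-- ===== LEMMAS AND PROOFS =====

-- ===== VERDICT (by name: the statement is the Claim_ definition above) =====
theorem check_spec : Claim_equal_check := by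
  intro s1 s2 _
  unfold Spec_check check check_alt
  apply Bool.eq_iff_iff.mpr
  simp [List.all_eq_true, PySem.List.mem_sorted, PySem.Set.isdisjoint_iff, PySem.Set.mem_ofList]
  exact ⟨fun h a ha hb => h a ha a hb rfl, fun h a ha b hb e => h a ha (e ▸ hb)⟩
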